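-- pv_equiv track=rewrite | github.com/melikkul/KokTurk | src/benchmark/robustness.py | perturb
-- ===== SOURCE A (Python) =====
-- _VOWELS = set("aeıioöuüAEIİOÖUÜ")
--
-- def perturb(text: str, vowel_repeat: int = 3) -> str:
--     out = []
--     prev_vowel = False
--     for ch in text:
--         if ch in _VOWELS and not prev_vowel:
--             out.append(ch * vowel_repeat)
--             prev_vowel = True
--         else:
--             out.append(ch)
--             prev_vowel = ch in _VOWELS
--     return "".join(out) + "!!!"
-- ===== SOURCE B (Python) =====
-- _VOWELS = set("aeıioöuüAEIİOÖUÜ")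
--
-- def perturb(text: str, vowel_repeat: int = 3) -> str:
--     pieces = []
--     i, n = 0, len(text)
--     while i < n:
--         if text[i] in _VOWELS:
--             j = i + 1
--             while j < n and text[j] in _VOWELS:
--                 j += 1
--             pieces.append(text[i] * vowel_repeat)
--             pieces.append(text[i + 1:j])
--             i = j
--         else:
--             pieces.append(text[i])
--             i += 1
--     return "".join(pieces) + "!!!"
-- ===== Notes on version B (the rewrite author's own statement) =====
-- stated objective: alternative
-- what changed: B scans the string as maximal vowel/non-vowel runs with an index two-level while loop (repeat only the first char of each vowel run, copy the rest of the run as a slice), instead of A's char-by-char loop carrying a prev_vowel boolean.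
import Mathlib
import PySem

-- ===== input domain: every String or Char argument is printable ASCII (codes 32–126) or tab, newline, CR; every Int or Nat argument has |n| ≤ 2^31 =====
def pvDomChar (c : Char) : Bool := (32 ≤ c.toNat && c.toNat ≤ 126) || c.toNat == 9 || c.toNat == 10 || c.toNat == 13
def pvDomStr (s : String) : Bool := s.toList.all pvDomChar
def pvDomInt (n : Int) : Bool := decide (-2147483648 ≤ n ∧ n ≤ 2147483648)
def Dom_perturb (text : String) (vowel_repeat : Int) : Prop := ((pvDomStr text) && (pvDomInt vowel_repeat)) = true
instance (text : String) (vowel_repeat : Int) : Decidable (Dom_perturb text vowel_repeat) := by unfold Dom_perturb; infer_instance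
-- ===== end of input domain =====

-- B replaces A's char-by-char loop with a prev_vowel flag by a scan over maximal vowel runs
-- (repeat the first char of each vowel run, copy the run's tail verbatim): alternative decomposition, same cost.

-- shared: the vowel set of both Pythons, and Python's 'ch * k' (empty for k ≤ 0)
def pvVowels : List Char := "aeıioöuüAEIİOÖUÜ".toList
def pvIsVowel (c : Char) : Bool := pvVowels.contains c
def pvRepChar (c : Char) (k : Int) : String := String.ofList (List.replicate k.toNat c)

-- ===== PORT A =====
-- A's for-loop: state = (out, prev_vowel), one step per character
def perturbLoopA (chars : List Char) (k : Int) (out : List String) (prev : Bool) : List String :=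
  match chars with
  | [] => out
  | ch :: rest =>
    if pvIsVowel ch && !prev then perturbLoopA rest k (out ++ [pvRepChar ch k]) true
    else perturbLoopA rest k (out ++ [String.singleton ch]) (pvIsVowel ch)

-- "".join(out)
def pvJoin (l : List String) : String :=
  match l with
  | [] => ""
  | s :: rest => s ++ pvJoin rest

def perturb (text : String) (vowel_repeat : Int) : String :=
  pvJoin (perturbLoopA text.toList vowel_repeat [] false) ++ "!!!"

-- ===== PORT B =====
-- B's run scanner: on a vowel, consume the whole maximal vowel run at once (repeat its head, copy its tail)
def perturbRunsB (l : List Char) (k : Int) : List String :=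
  match l with
  | [] => []
  | c :: rest =>
    if pvIsVowel c then
      pvRepChar c k :: String.ofList (rest.takeWhile pvIsVowel)
        :: perturbRunsB (rest.dropWhile pvIsVowel) k
    else String.singleton c :: perturbRunsB rest k
termination_by l.length
decreasing_by
· exact Nat.lt_succ_of_le (List.length_dropWhile_le _ _)
· simp

def perturb_alt (text : String) (vowel_repeat : Int) : String :=
  pvJoin (perturbRunsB text.toList vowel_repeat) ++ "!!!"

-- ===== PRECONDITION & SPEC =====
def Spec_perturb (text : String) (vowel_repeat : Int) (out : String) : Prop := out = perturb_alt text vowel_repeat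
instance (text : String) (vowel_repeat : Int) (out : String) : Decidable (Spec_perturb text vowel_repeat out) := by unfold Spec_perturb; infer_instance

-- ===== CLAIM (what is proved, stated in full; the proofs are below) =====
def Claim_equal_perturb : Prop := ∀ (text : String) (vowel_repeat : Int), Dom_perturb text vowel_repeat → Spec_perturb text vowel_repeat (perturb text vowel_repeat)

-- ===== LEMMAS AND PROOFS =====

theorem pvJoin_append (l1 l2 : List String) : pvJoin (l1 ++ l2) = pvJoin l1 ++ pvJoin l2 := by
  induction l1 with
  | nil => simp [pvJoin]
  | cons a t ih => simp [pvJoin, ih, String.append_assoc]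

theorem perturbLoopA_acc (l : List Char) (k : Int) (out : List String) (prev : Bool) :
    perturbLoopA l k out prev = out ++ perturbLoopA l k [] prev := by
  induction l generalizing out prev with
  | nil => simp [perturbLoopA]
  | cons c rest ih =>
    simp only [perturbLoopA, List.nil_append]
    split_ifs with h
    · rw [ih (out ++ [pvRepChar c k]), ih [pvRepChar c k]]; simp
    · rw [ih (out ++ [String.singleton c]), ih [String.singleton c]]; simp

theorem singleton_append_ofList (c : Char) (l : List Char) :
    String.singleton c ++ String.ofList l = String.ofList (c :: l) := by
  apply String.ext; simp

theorem runsB_nil (k : Int) : perturbRunsB [] k = [] := by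
  rw [perturbRunsB]

theorem runsB_cons (c : Char) (rest : List Char) (k : Int) :
    perturbRunsB (c :: rest) k =
      if pvIsVowel c then
        pvRepChar c k :: String.ofList (rest.takeWhile pvIsVowel)
          :: perturbRunsB (rest.dropWhile pvIsVowel) k
      else String.singleton c :: perturbRunsB rest k := by
  rw [perturbRunsB]

theorem perturb_key (n : ℕ) : ∀ (l : List Char), l.length ≤ n → ∀ (k : Int),
    pvJoin (perturbLoopA l k [] true)
      = String.ofList (l.takeWhile pvIsVowel) ++ pvJoin (perturbRunsB (l.dropWhile pvIsVowel) k)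
    ∧ pvJoin (perturbLoopA l k [] false) = pvJoin (perturbRunsB l k) := by
  induction n with
  | zero =>
    intro l hl k
    have : l = [] := List.eq_nil_of_length_eq_zero (Nat.le_zero.mp hl)
    subst this
    constructor <;> simp [perturbLoopA, runsB_nil, pvJoin]
  | succ n ih =>
    intro l hl k
    cases l with
    | nil => constructor <;> simp [perturbLoopA, runsB_nil, pvJoin]
    | cons c rest =>
      have hlen : rest.length ≤ n := Nat.le_of_succ_le_succ hl
      by_cases hv : pvIsVowel c
      · constructor
        · -- prev = true, vowel head: else branch, prev stays true
          simp only [perturbLoopA]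
          rw [if_neg (by simp : ¬((pvIsVowel c && !true) = true)), hv]
          rw [perturbLoopA_acc, pvJoin_append, (ih rest hlen k).1]
          simp only [List.takeWhile_cons, List.dropWhile_cons, hv, if_pos,
            List.nil_append, pvJoin, String.append_empty]
          rw [← String.append_assoc, singleton_append_ofList]
        · -- prev = false, vowel head: then branch
          simp only [perturbLoopA]
          rw [if_pos (by simp [hv] : (pvIsVowel c && !false) = true)]
          rw [perturbLoopA_acc, pvJoin_append, (ih rest hlen k).1, runsB_cons]
          simp [hv, pvJoin, String.append_assoc]
      · -- non-vowel head: both prev values take the else branch with new prev = false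
        have hvf : pvIsVowel c = false := by simpa using hv
        have hA : ∀ p : Bool, perturbLoopA (c :: rest) k [] p
            = [String.singleton c] ++ perturbLoopA rest k [] false := by
          intro p
          simp only [perturbLoopA]
          rw [if_neg (by simp [hvf] : ¬((pvIsVowel c && !p) = true)), hvf]
          exact perturbLoopA_acc rest k [String.singleton c] false
        constructor
        · rw [hA, pvJoin_append, (ih rest hlen k).2]
          simp only [List.takeWhile_cons, List.dropWhile_cons, hvf, Bool.false_eq_true,
            if_false]
          rw [runsB_cons]
          simp [hvf, pvJoin]
        · rw [hA, pvJoin_append, (ih rest hlen k).2, runsB_cons]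
          simp [hvf, pvJoin]

-- ===== VERDICT (by name: the statement is the Claim_ definition above) =====
theorem perturb_spec : Claim_equal_perturb := by
  intro text k _
  unfold Spec_perturb perturb perturb_alt
  rw [(perturb_key text.toList.length text.toList le_rfl k).2]
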